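-- pv_equiv track=rewrite | github.com/herculespan/term-to-context_relation | AbstractStatistics.py | find_word_positions
-- ===== SOURCE A (Python) =====
-- def find_word_positions(text, words):
--     positions = {}
--     # Convert the text to lowercase to ensure case-insensitive matching
--     lower_text = text.lower()
--     for word in words:
--         # Also convert the word to lowercase
--         lower_word = word.lower()
--         start = 0
--         # Find all occurrences of the word
--         while True:
--             start = lower_text.find(lower_word, start)
--             if start == -1:  # No more occurrences
--                 break
--             if word in positions:
--                 positions[word].append(start)
--             else:
--                 positions[word] = [start]
--             start += len(lower_word)  # Move past the current found word
--     return positions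
-- ===== SOURCE B (Python) =====
-- def find_word_positions(text, words):
--     positions = {}
--     lower_text = text.lower()
--     n = len(lower_text)
--     for word in words:
--         lower_word = word.lower()
--         m = len(lower_word)
--         # all match positions (including overlapping ones), left to right
--         matches = [i for i in range(n - m + 1) if lower_text[i:i + m] == lower_word]
--         # greedy left-to-right non-overlap filter
--         sel = []
--         nxt = 0
--         for p in matches:
--             if p >= nxt:
--                 sel.append(p)
--                 nxt = p + m
--         if sel:
--             if word in positions:
--                 positions[word].extend(sel)
--             else:
--                 positions[word] = sel
--     return positions
-- ===== Notes on version B (the rewrite author's own statement) =====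
-- stated objective: alternative
-- what changed: B replaces A's find-and-jump while loop (which interleaves dict updates with the string scan) by two separate phases: a full positional scan that collects every (possibly overlapping) match via slice comparison, then a greedy left-to-right non-overlap filter, with one bulk dict update per word; the full scan trades large-input speed (it tests every position in Python instead of C-level str.find) for a plainer structure. Pre_ excludes word lists containing the empty string, on which A loops forever (str.find('', start) returns start, which is never advanced).
import Mathlib
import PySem

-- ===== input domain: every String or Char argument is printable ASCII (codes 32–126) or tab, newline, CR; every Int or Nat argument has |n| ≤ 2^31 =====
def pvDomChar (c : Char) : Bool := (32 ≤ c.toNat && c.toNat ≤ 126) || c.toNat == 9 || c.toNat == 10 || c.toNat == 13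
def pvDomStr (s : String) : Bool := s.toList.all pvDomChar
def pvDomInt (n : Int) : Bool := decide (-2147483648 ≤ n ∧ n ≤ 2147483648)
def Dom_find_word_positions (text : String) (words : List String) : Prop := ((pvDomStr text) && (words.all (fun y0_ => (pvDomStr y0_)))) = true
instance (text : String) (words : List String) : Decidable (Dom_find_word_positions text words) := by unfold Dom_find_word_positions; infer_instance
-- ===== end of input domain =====

-- B is an alternative implementation: instead of A's find-and-jump while loop it collects every
-- (possibly overlapping) match position by a full slice-comparison scan and then applies a separate
-- greedy left-to-right non-overlap filter; equal cost, different structure (no speed claim).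

-- ===== PORT A =====
-- A's 'while True' loop; Python has no fuel — fuel (text length + 1) bounds the number of
-- iterations on every input admitted by Pre_ (each found match advances start by len(word) ≥ 1).
def pvALoop (lower_text lower_word word : String) :
    Nat → Int → PySem.Dict String (List Int) → PySem.Dict String (List Int)
  | 0, _, positions => positions
  | fuel+1, start0, positions =>
    let start := PySem.Str.findFrom lower_text lower_word start0
    if start = -1 then positions
    else
      pvALoop lower_text lower_word word fuel (start + PySem.Str.len lower_word)
        (if positions.contains word then positions.modify word [] (· ++ [start])
         else positions.insert word [start])

def find_word_positions (text : String) (words : List String) : List (String × List Int) :=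
  let lower_text := PySem.Str.lower text
  (words.foldl (fun positions word =>
      let lower_word := PySem.Str.lower word
      pvALoop lower_text lower_word word (lower_text.toList.length + 1) 0 positions)
    PySem.Dict.empty).items

-- ===== PORT B =====
def find_word_positions_alt (text : String) (words : List String) : List (String × List Int) :=
  let lower_text := PySem.Str.lower text
  let n := PySem.Str.len lower_text
  (words.foldl (fun positions word =>
      let lower_word := PySem.Str.lower word
      let m := PySem.Str.len lower_word
      let occs := (PySem.List.pyRange 0 (n - m + 1) 1).filter
          (fun i => PySem.Str.slice lower_text (some i) (some (i + m)) == lower_word)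
      let selN := occs.foldl
          (fun (acc : List Int × Int) p => if acc.2 ≤ p then (acc.1 ++ [p], p + m) else acc)
          ([], 0)
      if selN.1 = [] then positions
      else if positions.contains word then positions.modify word [] (· ++ selN.1)
      else positions.insert word selN.1)
    PySem.Dict.empty).items

-- ===== PRECONDITION & SPEC =====
-- Pre_ excludes word lists containing the empty string: there A's while loop never terminates
-- (str.find('', start) returns start, which is then advanced by len('') = 0).
def Pre_find_word_positions (text : String) (words : List String) : Prop :=
  ∀ w ∈ words, w ≠ ""
instance (text : String) (words : List String) : Decidable (Pre_find_word_positions text words) := by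
  unfold Pre_find_word_positions; infer_instance

def pvWitness_find_word_positions : String × List String := ("Hello hello", ["hello", "l", "LL"])

def Spec_find_word_positions (text : String) (words : List String) (out : List (String × List Int)) : Prop := out = find_word_positions_alt text words
instance (text : String) (words : List String) (out : List (String × List Int)) : Decidable (Spec_find_word_positions text words out) := by unfold Spec_find_word_positions; infer_instance

-- ===== CLAIM (what is proved, stated in full; the proofs are below) =====
def Claim_equal_find_word_positions : Prop := ∀ (text : String) (words : List String), Dom_find_word_positions text words → Pre_find_word_positions text words → Spec_find_word_positions text words (find_word_positions text words)

-- ===== LEMMAS AND PROOFS =====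

-- the list of all (possibly overlapping) match positions, as B computes it, on the list side
def pvMs (ltl lwl : List Char) : List Int :=
  (PySem.List.pyRange 0 ((ltl.length : Int) - (lwl.length : Int) + 1) 1).filter
    (fun i => PySem.List.slice ltl (some i) (some (i + (lwl.length : Int))) == lwl)

-- B's greedy non-overlap selection
def pvGsel (m : Int) : Int → List Int → List Int
  | _, [] => []
  | nxt, p :: ps => if nxt ≤ p then p :: pvGsel m (p + m) ps else pvGsel m nxt ps

-- the common result of one word's processing
def pvRes (d : PySem.Dict String (List Int)) (word : String) (l : List Int) :
    PySem.Dict String (List Int) :=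
  if l = [] then d else d.insert word (d.getD word [] ++ l)

theorem pvMs_mem (ltl lwl : List Char) (p : Int) :
    p ∈ pvMs ltl lwl ↔ 0 ≤ p ∧ p ≤ (ltl.length : Int) - lwl.length ∧ lwl <+: ltl.drop p.toNat := by
  unfold pvMs
  rw [List.mem_filter, PySem.List.mem_pyRange_one]
  have hsl : ∀ (h0 : 0 ≤ p), PySem.List.slice ltl (some p) (some (p + (lwl.length : Int)))
      = (ltl.drop p.toNat).take lwl.length := by
    intro h0
    rw [PySem.List.slice_toNat ltl h0 (by omega)]
    congr 1
    omega
  constructor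
  · rintro ⟨⟨h0, hlt⟩, hb⟩
    rw [beq_iff_eq, hsl h0] at hb
    refine ⟨h0, by omega, ?_⟩
    rw [← hb]
    exact List.take_prefix _ _
  · rintro ⟨h0, hle, hpre⟩
    refine ⟨⟨h0, by omega⟩, ?_⟩
    rw [beq_iff_eq, hsl h0]
    have hlen : lwl.length ≤ (ltl.drop p.toNat).length := hpre.length_le
    exact ((List.prefix_iff_eq_take.mp hpre)).symm

theorem pvMs_sorted (ltl lwl : List Char) : (pvMs ltl lwl).Pairwise (· < ·) := by
  exact (PySem.List.pairwise_lt_pyRange_one _ _).filter _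

theorem pvGsel_fold (m : Int) (ms : List Int) :
    ∀ (acc : List Int) (nxt : Int),
      (ms.foldl (fun (acc : List Int × Int) p =>
          if acc.2 ≤ p then (acc.1 ++ [p], p + m) else acc) (acc, nxt)).1
        = acc ++ pvGsel m nxt ms := by
  intro acc nxt
  induction ms generalizing acc nxt with
  | nil => simp [pvGsel]
  | cons p ps ih =>
    simp only [List.foldl_cons, pvGsel]
    by_cases h : nxt ≤ p
    · simp [h, ih, List.append_assoc]
    · simp [h, ih]

theorem pvGsel_filter (m : Int) (hm : 0 ≤ m) (l : List Int) :
    ∀ (nxt' nxt : Int), nxt' ≤ nxt →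
      pvGsel m nxt (l.filter (fun x => nxt' ≤ x)) = pvGsel m nxt l := by
  induction l with
  | nil => intro _ _ _; rfl
  | cons x xs ih =>
    intro nxt' nxt hle
    by_cases hx : nxt ≤ x
    · have hx' : nxt' ≤ x := le_trans hle hx
      simp only [List.filter_cons, decide_eq_true_eq, hx', if_pos, pvGsel, hx]
      exact congrArg _ (ih nxt' (x + m) (by omega))
    · by_cases hx' : nxt' ≤ x
      · simp only [List.filter_cons, decide_eq_true_eq, hx', if_pos, pvGsel, hx, ite_false]
        exact ih nxt' nxt hle
      · simp only [List.filter_cons, decide_eq_true_eq, hx', ite_false, pvGsel, hx]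
        exact ih nxt' nxt hle

theorem pvRes_eq_insert (d : PySem.Dict String (List Int)) (word : String) (l : List Int)
    (h : l ≠ []) : pvRes d word l = d.insert word (d.getD word [] ++ l) := by
  simp [pvRes, h]


theorem pvAppL (d : PySem.Dict String (List Int)) (word : String) (l : List Int) :
    (if d.contains word then d.modify word [] (· ++ l) else d.insert word l)
      = d.insert word (d.getD word [] ++ l) := by
  by_cases h : d.contains word
  · simp [h, PySem.Dict.modify]
  · have h0 : d.getD word [] = [] :=
      PySem.Dict.getD_of_not_contains d [] (by simpa using h)
    simp [h, h0]

theorem pvRes_step (d : PySem.Dict String (List Int)) (word : String) (p : Int) (l : List Int) :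
    pvRes (d.insert word (d.getD word [] ++ [p])) word l = pvRes d word (p :: l) := by
  rcases eq_or_ne l [] with rfl | h
  · simp [pvRes]
  · rw [pvRes_eq_insert _ _ _ h, pvRes_eq_insert _ _ _ (by simp)]
    rw [PySem.Dict.getD_insert_self, PySem.Dict.insert_insert_self]
    simp

theorem pvF_nil (lt lw : List Char) (hw : lw ≠ []) (s : Nat) (hs : s ≤ lt.length)
    (h : (pvMs lt lw).filter (fun x => (s : Int) ≤ x) = []) :
    PySem.Chars.findFrom lt lw (s : Int) = -1 := by
  rw [PySem.Chars.findFrom_natCast_eq_neg_one_iff lt lw s hs]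
  intro hinf
  obtain ⟨t, hpre, hsuf⟩ := List.infix_iff_prefix_suffix.mp hinf
  obtain ⟨u, hu⟩ := hsuf
  have ht : t = (lt.drop s).drop u.length := by rw [← hu]; simp
  have hpre' : lw <+: lt.drop (s + u.length) := by
    rw [← List.drop_drop, ← ht]; exact hpre
  have hmem : ((s + u.length : Nat) : Int) ∈ pvMs lt lw := by
    rw [pvMs_mem]
    have hlen := hpre'.length_le
    rw [List.length_drop] at hlen
    have h1 : 1 ≤ lw.length := List.length_pos_iff.mpr hw
    refine ⟨by positivity, by omega, by simpa using hpre'⟩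
  have : ((s + u.length : Nat) : Int) ∈ (pvMs lt lw).filter (fun x => (s : Int) ≤ x) := by
    rw [List.mem_filter]
    exact ⟨hmem, by simp⟩
  rw [h] at this
  simp at this

theorem pvF_cons (lt lw : List Char) (s : Nat) (hs : s ≤ lt.length) (p : Int) (rest : List Int)
    (h : (pvMs lt lw).filter (fun x => (s : Int) ≤ x) = p :: rest) :
    PySem.Chars.findFrom lt lw (s : Int) = p := by
  have hpmem : p ∈ pvMs lt lw ∧ (s : Int) ≤ p := by
    have : p ∈ (pvMs lt lw).filter (fun x => (s : Int) ≤ x) := by rw [h]; exact List.mem_cons_self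
    rw [List.mem_filter] at this
    exact ⟨this.1, by simpa using this.2⟩
  obtain ⟨hp0, hple, hppre⟩ := (pvMs_mem lt lw p).mp hpmem.1
  have hne : PySem.Chars.findFrom lt lw (s : Int) ≠ -1 := by
    rw [Ne, PySem.Chars.findFrom_natCast_eq_neg_one_iff lt lw s hs]
    push_neg
    have : lw <+: (lt.drop s).drop (p.toNat - s) := by
      rw [List.drop_drop]
      have : s + (p.toNat - s) = p.toNat := by omega
      rw [this]; exact hppre
    exact this.isInfix.trans (List.drop_suffix _ _).isInfix
  obtain ⟨hge, hpre_r, hmin⟩ := PySem.Chars.findFrom_natCast_spec lt lw s hs hne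
  set r := PySem.Chars.findFrom lt lw (s : Int) with hr
  have hr0 : 0 ≤ r := le_trans (by positivity) hge
  have hrle : r ≤ p := by
    by_contra hc
    push_neg at hc
    exact hmin p.toNat (by omega) (by omega) hppre
  have hrmem : r ∈ (pvMs lt lw).filter (fun x => (s : Int) ≤ x) := by
    rw [List.mem_filter, pvMs_mem]
    have hlen := hpre_r.length_le
    rw [List.length_drop] at hlen
    refine ⟨⟨hr0, by omega, hpre_r⟩, by simpa using hge⟩
  rw [h] at hrmem
  rcases List.mem_cons.mp hrmem with rfl | hmem2
  · rfl
  · -- sorted: p < every element of rest, so p < r, with r ≤ p gives contradiction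
    have hsort : (p :: rest).Pairwise (· < ·) := h ▸ (pvMs_sorted lt lw).filter _
    have := (List.pairwise_cons.mp hsort).1 r hmem2
    omega

theorem pvFilter_step (ms : List Int) (s : Nat) (p : Int) (rest : List Int) (s' : Nat)
    (hss : s ≤ s') (hp : ¬ ((s' : Int) ≤ p))
    (h : ms.filter (fun x => (s : Int) ≤ x) = p :: rest) :
    ms.filter (fun x => (s' : Int) ≤ x) = rest.filter (fun x => (s' : Int) ≤ x) := by
  have h1 : ms.filter (fun x => (s' : Int) ≤ x)
      = (ms.filter (fun x => (s : Int) ≤ x)).filter (fun x => (s' : Int) ≤ x) := by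
    rw [List.filter_filter]
    apply List.filter_congr
    intro x _
    by_cases hx : (s' : Int) ≤ x
    · have : (s : Int) ≤ x := le_trans (by exact_mod_cast Nat.cast_le.mpr hss) hx
      simp [hx, this]
    · simp [hx]
  rw [h1, h, List.filter_cons]
  simp [hp]

theorem pvALoop_eq (lt lw word : String) (hw : lw.toList ≠ []) :
    ∀ (fuel s : Nat) (d : PySem.Dict String (List Int)),
      s ≤ lt.toList.length →
      ((pvMs lt.toList lw.toList).filter (fun x => (s : Int) ≤ x)).length < fuel →
      pvALoop lt lw word fuel (s : Int) d
        = pvRes d word (pvGsel (lw.toList.length : Int) (s : Int)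
            ((pvMs lt.toList lw.toList).filter (fun x => (s : Int) ≤ x))) := by
  have hL : 1 ≤ lw.toList.length := by
    cases hlw : lw.toList with
    | nil => exact absurd hlw hw
    | cons c cs => simp
  intro fuel
  induction fuel with
  | zero => intro s d _ hlt; omega
  | succ fuel ih =>
    intro s d hs hlt
    rw [pvALoop]
    simp only [PySem.Str.findFrom_eq]
    cases hF : (pvMs lt.toList lw.toList).filter (fun x => (s : Int) ≤ x) with
    | nil =>
      rw [pvF_nil lt.toList lw.toList hw s hs hF]
      simp [pvGsel, pvRes]
    | cons p rest =>
      have hfind := pvF_cons lt.toList lw.toList s hs p rest hF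
      have hpmem : p ∈ pvMs lt.toList lw.toList ∧ (s : Int) ≤ p := by
        have : p ∈ (pvMs lt.toList lw.toList).filter (fun x => (s : Int) ≤ x) := by
          rw [hF]; exact List.mem_cons_self
        rw [List.mem_filter] at this
        exact ⟨this.1, by simpa using this.2⟩
      obtain ⟨hp0, hple, _⟩ := (pvMs_mem _ _ p).mp hpmem.1
      rw [hfind]
      have hpne : ¬ (p = -1) := by omega
      rw [if_neg hpne]
      have hlen : PySem.Str.len lw = (lw.toList.length : Int) := by
        simp
      set s' : Nat := p.toNat + lw.toList.length with hs'
      have hcast : p + PySem.Str.len lw = (s' : Int) := by rw [hlen]; omega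
      have hsle : s' ≤ lt.toList.length := by omega
      have hFs' : (pvMs lt.toList lw.toList).filter (fun x => (s' : Int) ≤ x)
          = rest.filter (fun x => (s' : Int) ≤ x) :=
        pvFilter_step _ s p rest s' (by omega) (by omega) hF
      have hflen : (rest.filter (fun x => (s' : Int) ≤ x)).length < fuel := by
        have h1 := List.length_filter_le (fun x => (s' : Int) ≤ x) rest
        rw [hF] at hlt
        simp only [List.length_cons] at hlt
        omega
      rw [pvAppL, hcast, ih s' _ hsle (by rw [hFs']; exact hflen)]
      rw [hFs', pvGsel_filter _ (by positivity) rest _ _ le_rfl, pvRes_step]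
      congr 1
      rw [pvGsel]
      rw [if_pos hpmem.2]
      congr 2
      omega

theorem pvStepA_eq (lt lw word : String) (hw : lw.toList ≠ []) (d : PySem.Dict String (List Int)) :
    pvALoop lt lw word (lt.toList.length + 1) 0 d
      = pvRes d word (pvGsel (lw.toList.length : Int) 0 (pvMs lt.toList lw.toList)) := by
  have h0 : (pvMs lt.toList lw.toList).filter (fun x => ((0 : Nat) : Int) ≤ x)
      = pvMs lt.toList lw.toList := by
    apply List.filter_eq_self.mpr
    intro x hx
    have := ((pvMs_mem _ _ x).mp hx).1
    simpa using this
  have hL : 1 ≤ lw.toList.length := List.length_pos_iff.mpr hw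
  have hlen : (pvMs lt.toList lw.toList).length < lt.toList.length + 1 := by
    have h1 : (pvMs lt.toList lw.toList).length
        ≤ (PySem.List.pyRange 0 ((lt.toList.length : Int) - lw.toList.length + 1) 1).length :=
      List.length_filter_le _ _
    rw [PySem.List.length_pyRange_one] at h1
    omega
  have h := pvALoop_eq lt lw word hw (lt.toList.length + 1) 0 d (by omega) (by rw [h0]; exact hlen)
  rw [h0] at h
  simpa using h

theorem pvIf_eq (d : PySem.Dict String (List Int)) (word : String) (sel : List Int) :
    (if sel = [] then d
     else if d.contains word then d.modify word [] (· ++ sel)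
     else d.insert word sel) = pvRes d word sel := by
  by_cases h : sel = []
  · simp [pvRes, h]
  · rw [if_neg h, pvAppL, pvRes_eq_insert _ _ _ h]

theorem pvBridge (lt lw : String) :
    (PySem.List.pyRange 0 (PySem.Str.len lt - PySem.Str.len lw + 1) 1).filter
      (fun i => PySem.Str.slice lt (some i) (some (i + PySem.Str.len lw)) == lw)
      = pvMs lt.toList lw.toList := by
  have hlt : PySem.Str.len lt = (lt.toList.length : Int) := by simp
  have hlw : PySem.Str.len lw = (lw.toList.length : Int) := by simp
  unfold pvMs
  rw [hlt, hlw]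
  apply List.filter_congr
  intro i _
  have hts : (PySem.Str.slice lt (some i) (some (i + (lw.toList.length : Int)))).toList
      = PySem.List.slice lt.toList (some i) (some (i + (lw.toList.length : Int))) := by
    rw [PySem.Str.toList_slice, PySem.Chars.slice_eq_listSlice]
  rw [Bool.eq_iff_iff]
  simp only [beq_iff_eq]
  rw [← String.toList_inj, hts]

theorem pvLowerNe (w : String) (h : w ≠ "") : (PySem.Str.lower w).toList ≠ [] := by
  rw [PySem.Str.toList_lower]
  unfold PySem.Chars.lower
  simp only [ne_eq, List.map_eq_nil_iff]
  intro hnil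
  exact h (String.toList_inj.mp (by rw [hnil]; rfl))

-- ===== VERDICT (by name: the statement is the Claim_ definition above) =====
theorem find_word_positions_spec : Claim_equal_find_word_positions := by
  intro text words _hdom hpre
  unfold Spec_find_word_positions find_word_positions find_word_positions_alt
  refine congrArg PySem.Dict.items (PySem.List.foldl_congr_mem _ _ _ _ ?_)
  intro acc w hw
  have hlwne : (PySem.Str.lower w).toList ≠ [] := pvLowerNe w (hpre w hw)
  have hA := pvStepA_eq (PySem.Str.lower text) (PySem.Str.lower w) w hlwne acc
  have hlw : PySem.Str.len (PySem.Str.lower w) = ((PySem.Str.lower w).toList.length : Int) := by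
    simp
  simp only [hA, pvGsel_fold, pvIf_eq]
  rw [pvBridge]
  simp only [hlw, List.nil_append]
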